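-- pv_equiv track=rewrite | github.com/horinsoftwaregroup/gando | src/gando/utils/strings/converters/__casing.py | k2p
-- ===== SOURCE A (Python) =====
-- def k2p(value: str):
--     tmp = ''
--     uppercase = True
--     for c in value:
--         if c == '-':
--             uppercase = True
--             continue
--         tmp += c.upper() if uppercase else c
--         uppercase = False
--     ret = tmp
--     return ret
-- ===== SOURCE B (Python) =====
-- def k2p(value: str):
--     return ''.join(p[:1].upper() + p[1:] for p in value.split('-'))
-- ===== Notes on version B (the rewrite author's own statement) =====
-- stated objective: faster
-- what changed: Replaces the stateful char-by-char loop (uppercase flag, quadratic string concatenation) with splitting on the dash into segments, uppercasing each segment's first character via p[:1].upper()+p[1:], and a single join.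
import Mathlib
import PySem

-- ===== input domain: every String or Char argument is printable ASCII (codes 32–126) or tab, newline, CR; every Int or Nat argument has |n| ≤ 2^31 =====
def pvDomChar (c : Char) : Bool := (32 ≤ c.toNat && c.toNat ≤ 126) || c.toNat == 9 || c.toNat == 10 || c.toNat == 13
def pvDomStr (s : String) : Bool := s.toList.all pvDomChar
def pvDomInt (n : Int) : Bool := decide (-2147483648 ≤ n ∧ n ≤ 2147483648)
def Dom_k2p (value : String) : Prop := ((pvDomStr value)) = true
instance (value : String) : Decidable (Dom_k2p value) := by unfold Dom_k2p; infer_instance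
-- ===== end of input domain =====

-- B replaces A's stateful char-by-char loop (uppercase flag) with split-on-'-',
-- uppercase-first-char per segment, and one join (objective: simpler).


-- ===== PORT A =====
-- the for-loop of A: state is (tmp, uppercase); c.upper() on ASCII = upperChar
def k2pLoop : List Char → List Char × Bool → List Char × Bool
  | [], st => st
  | c :: cs, (tmp, uppercase) =>
      if c = '-' then k2pLoop cs (tmp, true)
      else k2pLoop cs (tmp ++ [if uppercase then PySem.Chars.upperChar c else c], false)

def k2p (value : String) : String :=
  String.ofList (k2pLoop value.toList ([], true)).1

-- ===== PORT B =====
-- p[:1].upper() + p[1:]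
def k2pCap (p : List Char) : List Char :=
  PySem.Chars.upper (p.take 1) ++ p.drop 1

-- ''.join(cap(p) for p in value.split('-'))
def k2p_alt (value : String) : String :=
  String.ofList (PySem.Chars.join [] ((value.toList.splitOn '-').map k2pCap))

-- ===== PRECONDITION & SPEC =====
def Spec_k2p (value : String) (out : String) : Prop := out = k2p_alt value
instance (value : String) (out : String) : Decidable (Spec_k2p value out) := by unfold Spec_k2p; infer_instance

-- ===== CLAIM (what is proved, stated in full; the proofs are below) =====
def Claim_equal_k2p : Prop := ∀ (value : String), Dom_k2p value → Spec_k2p value (k2p value)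

-- ===== LEMMAS AND PROOFS =====

-- loop without the accumulator
def k2pAux : Bool → List Char → List Char
  | _, [] => []
  | u, c :: cs =>
      if c = '-' then k2pAux true cs
      else (if u then PySem.Chars.upperChar c else c) :: k2pAux false cs

theorem k2pLoop_eq (cs : List Char) (tmp : List Char) (u : Bool) :
    (k2pLoop cs (tmp, u)).1 = tmp ++ k2pAux u cs := by
  induction cs generalizing tmp u with
  | nil => simp [k2pLoop, k2pAux]
  | cons c cs ih =>
    by_cases h : c = '-' <;> simp [k2pLoop, k2pAux, h, ih]

theorem join_nil_cons (a : List Char) (l : List (List Char)) :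
    PySem.Chars.join [] (a :: l) = a ++ PySem.Chars.join [] l := by
  cases l with
  | nil => simp [PySem.Chars.join_singleton, PySem.Chars.join_nil]
  | cons b r => simp [PySem.Chars.join_cons_cons]

theorem k2pAux_split (cs : List Char) :
    k2pAux true cs = PySem.Chars.join [] ((cs.splitOn '-').map k2pCap) ∧
    k2pAux false cs =
      (cs.splitOn '-').headI ++
        PySem.Chars.join [] ((cs.splitOn '-').tail.map k2pCap) := by
  induction cs with
  | nil =>
    simp [k2pAux, List.splitOn, List.splitOnP_nil,
      PySem.Chars.join_nil, k2pCap, PySem.Chars.upper]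
  | cons c cs ih =>
    obtain ⟨ih₁, ih₂⟩ := ih
    by_cases h : c = '-'
    · subst h
      constructor <;>
        simp [k2pAux, List.splitOn, List.splitOnP_cons, join_nil_cons, k2pCap,
          PySem.Chars.upper, ih₁]
    · have hne := List.splitOnP_ne_nil (fun x => x == '-') cs
      obtain ⟨s, rest, hsr⟩ : ∃ s rest, cs.splitOn '-' = s :: rest := by
        cases hcs : cs.splitOn '-' with
        | nil => exact absurd hcs hne
        | cons s rest => exact ⟨s, rest, rfl⟩
      simp only [List.splitOn] at hsr
      constructor <;>
        simp [k2pAux, List.splitOn, List.splitOnP_cons, h, ih₂, hsr,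
          join_nil_cons, k2pCap, PySem.Chars.upper]

-- ===== VERDICT (by name: the statement is the Claim_ definition above) =====
theorem k2p_spec : Claim_equal_k2p := by
  intro value _
  unfold Spec_k2p k2p k2p_alt
  rw [k2pLoop_eq, List.nil_append, (k2pAux_split value.toList).1]
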